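-- pv_equiv track=rewrite | github.com/Vaibhav-Pacherwal/100-days-of-DSA | Day-18/day18-q1.py | countOcc
-- ===== SOURCE A (Python) =====
-- def countOcc(row,searchLeft):
--     row.sort()
--     count = 0
--     start,end = 0,len(row)-1
--     while start <= end:
--         mid = int(start + (end-start)/2)
--
--         if row[mid] < 1:
--             start = mid+1
--
--         elif row[mid] > 1:
--             end = mid-1
--
--         else:
--             count += 1
--             if searchLeft:
--                 end = mid-1
--             else:
--                 start = mid+1
--
--     return count
-- ===== SOURCE B (Python) =====
-- def countOcc(row, searchLeft):
--     def hits(seg):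
--         if not seg:
--             return 0
--         mid = (len(seg) - 1) // 2
--         v = seg[mid]
--         if v < 1:
--             return hits(seg[mid + 1:])
--         if v > 1:
--             return hits(seg[:mid])
--         return 1 + hits(seg[:mid] if searchLeft else seg[mid + 1:])
--     return hits(sorted(row))
-- ===== Notes on version B (the rewrite author's own statement) =====
-- stated objective: alternative
-- what changed: B recursively divides a sorted copy of the list, slicing away the half the search discards and adding 1 per hit, instead of A's iterative index-bound loop with an accumulator over the list it sorts in place; B does not mutate its argument.
import Mathlib
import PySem

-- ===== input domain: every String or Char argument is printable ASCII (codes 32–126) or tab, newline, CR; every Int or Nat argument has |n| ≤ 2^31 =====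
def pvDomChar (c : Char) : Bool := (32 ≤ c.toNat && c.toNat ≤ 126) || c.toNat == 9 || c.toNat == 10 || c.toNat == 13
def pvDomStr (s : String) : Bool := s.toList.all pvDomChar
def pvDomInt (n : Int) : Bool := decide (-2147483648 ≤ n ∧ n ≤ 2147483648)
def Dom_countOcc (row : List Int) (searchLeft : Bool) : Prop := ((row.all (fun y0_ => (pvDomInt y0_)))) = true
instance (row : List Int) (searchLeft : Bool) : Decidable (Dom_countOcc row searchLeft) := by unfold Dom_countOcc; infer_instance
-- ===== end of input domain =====

-- B replaces A's iterative index-bound loop with an accumulator by a recursion that slices the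
-- discarded half off a sorted copy; same return value. A sorts `row` in place (a caller-visible
-- mutation B does not perform); the equivalence proved here is about the return value only.

-- ===== PORT A =====
-- A's while loop. `int(start + (end-start)/2)` truncates a float; inside the loop start ≤ e,
-- so the quotient is nonnegative and the truncation is exactly floor division (exact on Dom's sizes).
-- `row[mid]`: mid is always in range here (0 ≤ start ≤ mid ≤ e < len), so the total pyGetD is exact.
-- fuel is only a structural-termination guard: the interval [start,e] shrinks every iteration,
-- so fuel = length + 1 is never exhausted.
def countOccLoopA (s : List Int) (sl : Bool) : Nat → Int → Int → Int → Int
  | 0, _, _, count => count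
  | fuel + 1, start, e, count =>
    if start ≤ e then
      if PySem.List.pyGetD s (start + PySem.Int.floordiv (e - start) 2) 0 < 1 then
        countOccLoopA s sl fuel (start + PySem.Int.floordiv (e - start) 2 + 1) e count
      else if PySem.List.pyGetD s (start + PySem.Int.floordiv (e - start) 2) 0 > 1 then
        countOccLoopA s sl fuel start (start + PySem.Int.floordiv (e - start) 2 - 1) count
      else if sl then
        countOccLoopA s sl fuel start (start + PySem.Int.floordiv (e - start) 2 - 1) (count + 1)
      else
        countOccLoopA s sl fuel (start + PySem.Int.floordiv (e - start) 2 + 1) e (count + 1)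
    else count

def countOcc (row : List Int) (searchLeft : Bool) : Int :=
  let s := PySem.List.sorted row (fun x => x) false   -- row.sort()
  countOccLoopA s searchLeft (s.length + 1) 0 (PySem.List.len s - 1) 0

-- ===== PORT B =====
-- B's inner recursion `hits`. `(len(seg)-1)//2` is Nat division on a nonnegative value, exact.
-- `seg[mid]` with 0 ≤ mid < len(seg) → total pyGetD, exact. The slices seg[:mid] and seg[mid+1:]
-- have nonnegative in-range bounds, so they are List.take / List.drop, exact.
-- fuel is only a structural-termination guard: seg strictly shrinks, so length + 1 is never exhausted.
def hitsB (sl : Bool) : Nat → List Int → Int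
  | 0, _ => 0
  | fuel + 1, seg =>
    if seg = [] then 0
    else if PySem.List.pyGetD seg (((seg.length - 1) / 2 : Nat) : Int) 0 < 1 then
      hitsB sl fuel (seg.drop ((seg.length - 1) / 2 + 1))
    else if PySem.List.pyGetD seg (((seg.length - 1) / 2 : Nat) : Int) 0 > 1 then
      hitsB sl fuel (seg.take ((seg.length - 1) / 2))
    else
      1 + hitsB sl fuel (if sl then seg.take ((seg.length - 1) / 2)
                         else seg.drop ((seg.length - 1) / 2 + 1))

def countOcc_alt (row : List Int) (searchLeft : Bool) : Int :=
  hitsB searchLeft (row.length + 1) (PySem.List.sorted row (fun x => x) false)   -- hits(sorted(row))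

-- ===== PRECONDITION & SPEC =====
def Spec_countOcc (row : List Int) (searchLeft : Bool) (out : Int) : Prop := out = countOcc_alt row searchLeft
instance (row : List Int) (searchLeft : Bool) (out : Int) : Decidable (Spec_countOcc row searchLeft out) := by
  unfold Spec_countOcc; infer_instance

-- ===== CLAIM =====
def Claim_equal_countOcc : Prop := ∀ (row : List Int) (searchLeft : Bool),
  Dom_countOcc row searchLeft → Spec_countOcc row searchLeft (countOcc row searchLeft)

-- ===== LEMMAS AND PROOFS =====

-- A's loop on the interval [start,e] equals count plus B's recursion on the slice s[start..e].
theorem loopA_eq_hitsB (s : List Int) (sl : Bool) :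
    ∀ (fuel : Nat) (start e count : Int), 0 ≤ start → e < (s.length : Int) →
      countOccLoopA s sl fuel start e count
        = count + hitsB sl fuel ((s.drop start.toNat).take (e + 1 - start).toNat) := by
  intro fuel
  induction fuel with
  | zero => intro start e count _ _; simp [countOccLoopA, hitsB]
  | succ fuel ih =>
    intro start e count h0 he
    set seg := (s.drop start.toNat).take (e + 1 - start).toNat with hseg
    have hlseg : seg.length = (e + 1 - start).toNat ⊓ (s.length - start.toNat) := by
      simp [hseg]
    rw [countOccLoopA, hitsB]
    by_cases h : start ≤ e
    · have hlen : seg.length = (e + 1 - start).toNat := by omega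
      have hne : ¬ seg = [] := by
        intro hc; rw [hc] at hlen; simp at hlen; omega
      rw [if_pos h, if_neg hne]
      have hfd := PySem.Int.floordiv_eq_ediv_of_pos (a := e - start) (b := 2) (by omega)
      set m : Nat := (seg.length - 1) / 2 with hm
      have hmabs : start + PySem.Int.floordiv (e - start) 2 = start + (m : Int) := by
        rw [hfd, hm, hlen]; omega
      have hmlt : m < seg.length := by omega
      have hsegle : start.toNat + seg.length ≤ s.length := by omega
      have hmltlen : start.toNat + m < s.length := by omega
      -- the probed element is the same on both sides
      have hget : PySem.List.pyGetD s (start + PySem.Int.floordiv (e - start) 2) 0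
          = PySem.List.pyGetD seg ((m : Nat) : Int) 0 := by
        rw [hmabs, PySem.List.pyGetD_eq_getElem s 0 (by omega) (by push_cast; omega),
            PySem.List.pyGetD_eq_getElem seg 0 (by omega) (by push_cast; omega)]
        simp only [hseg, List.getElem_take, List.getElem_drop]
        congr 1
        omega
      -- the two recursion arguments
      have hdrop : (s.drop (start + (m : Int) + 1).toNat).take (e + 1 - (start + (m : Int) + 1)).toNat
          = seg.drop (m + 1) := by
        rw [hseg, List.drop_take, List.drop_drop]
        congr 1
        · omega
        · congr 1
          omega
      have htake : (s.drop start.toNat).take ((start + (m : Int) - 1) + 1 - start).toNat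
          = seg.take m := by
        rw [hseg, List.take_take]
        congr 1
        omega
      rw [hget]
      by_cases hc1 : PySem.List.pyGetD seg (m : Int) 0 < 1
      · rw [if_pos hc1, if_pos hc1, ih _ _ _ (by omega) he, hmabs, hdrop]
      · rw [if_neg hc1, if_neg hc1]
        by_cases hc2 : PySem.List.pyGetD seg (m : Int) 0 > 1
        · rw [if_pos hc2, if_pos hc2, ih _ _ _ h0 (by push_cast; omega), hmabs, htake]
        · rw [if_neg hc2, if_neg hc2]
          cases sl with
          | true =>
            rw [if_pos rfl, if_pos rfl, ih _ _ _ h0 (by push_cast; omega), hmabs, htake]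
            ring
          | false =>
            rw [if_neg (by simp), if_neg (by simp), ih _ _ _ (by omega) he, hmabs, hdrop]
            ring
    · have hnil : seg = [] := by
        have : (e + 1 - start).toNat = 0 := by omega
        rw [hseg, this]; simp
      rw [if_neg h, if_pos hnil]
      simp

-- ===== VERDICT =====
theorem countOcc_spec : Claim_equal_countOcc := by
  intro row searchLeft _
  unfold Spec_countOcc countOcc countOcc_alt
  have hlen : (PySem.List.sorted row (fun x => x) false).length = row.length :=
    (PySem.List.sorted_perm row (fun x => x) false).length_eq
  set s := PySem.List.sorted row (fun x => x) false with hsdef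
  simp only [PySem.List.len_eq]
  rw [loopA_eq_hitsB s searchLeft (s.length + 1) 0 ((s.length : Int) - 1) 0 (by omega) (by omega)]
  have hfull : (s.drop (0 : Int).toNat).take ((s.length : Int) - 1 + 1 - 0).toNat = s := by
    simp
  rw [hfull, hlen]
  ring
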